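-- pv_equiv track=rewrite | github.com/lukkiwos/prg-basics | 04-Functions/Zadania_6/6-15.py | f
-- ===== SOURCE A (Python) =====
-- def f(detector):
--     current_occupants = 0
--     max_occupants = 0
--
--     for event in detector:
--
--         if event == '+':
--             # Wejście do pomieszczenia
--             current_occupants += 1
--
--         elif event == '-':
--             # Wyjście z pomieszczenia
--             # Zakładamy, że liczba osób nie spadnie poniżej zera
--             current_occupants -= 1
--
--         # Aktualizujemy maksymalną zaobserwowaną liczbę osób
--         if current_occupants > max_occupants:
--             max_occupants = current_occupants
--
--         # Optymalizacja: jeśli osiągnęliśmy już warunek (>= 3), możemy zakończyć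
--         if max_occupants >= 3:
--             # Zwracamy True, gdy tylko warunek zostanie spełniony
--             return True
--
--     # Jeśli pętla się zakończyła i nigdy nie osiągnięto 3 osób
--     return max_occupants >= 3
-- ===== SOURCE B (Python) =====
-- def f(detector):
--     # Divide and conquer: for a segment compute (total delta, max prefix sum),
--     # combine halves with (s1+s2, max(m1, s1+m2)); answer: max prefix >= 3.
--     def dc(ev):
--         if not ev:
--             return (0, 0)
--         if len(ev) == 1:
--             e = ev[0]
--             d = 1 if e == '+' else (-1 if e == '-' else 0)
--             return (d, max(d, 0))
--         k = len(ev) // 2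
--         s1, m1 = dc(ev[:k])
--         s2, m2 = dc(ev[k:])
--         return (s1 + s2, max(m1, s1 + m2))
--     return dc(detector)[1] >= 3
-- ===== Notes on version B (the rewrite author's own statement) =====
-- stated objective: alternative
-- what changed: Replaces A's single left-to-right scan with current/max accumulators and early return by a divide-and-conquer that computes (total delta, max prefix sum) for each half of the list and combines them with (s1+s2, max(m1, s1+m2)), then checks whether the max prefix sum reaches 3.
import Mathlib
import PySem

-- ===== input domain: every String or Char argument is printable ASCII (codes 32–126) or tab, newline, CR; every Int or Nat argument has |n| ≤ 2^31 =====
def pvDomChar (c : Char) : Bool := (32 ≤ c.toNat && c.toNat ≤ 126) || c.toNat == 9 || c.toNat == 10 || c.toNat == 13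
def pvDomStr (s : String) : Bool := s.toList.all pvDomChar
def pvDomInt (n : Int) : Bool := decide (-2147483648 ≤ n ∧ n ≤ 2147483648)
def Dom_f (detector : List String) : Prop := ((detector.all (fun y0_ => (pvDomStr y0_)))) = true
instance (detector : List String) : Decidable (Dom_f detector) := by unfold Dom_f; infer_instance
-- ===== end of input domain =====

-- B replaces A's single scan (current/max accumulators, early return) by a
-- divide-and-conquer computing (total delta, max prefix sum) per half; same O(n) cost.

-- ===== PORT A =====
-- loop of A: state (current_occupants, max_occupants), early return True when max >= 3
def fLoopA : List String → Int → Int → Bool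
  | [], _, maxO => decide (maxO ≥ 3)
  | e :: rest, cur, maxO =>
      let cur' : Int := if e = "+" then cur + 1 else if e = "-" then cur - 1 else cur
      let max' : Int := if cur' > maxO then cur' else maxO
      if max' ≥ 3 then true else fLoopA rest cur' max'

def f (detector : List String) : Bool := fLoopA detector 0 0

-- ===== PORT B =====
-- dc(ev): (total delta, max prefix sum) of the segment, by splitting at len//2.
-- Fuel (= list length at the top call) only makes the recursion structural; it is
-- never exhausted since each half is strictly shorter.
def fDCF : Nat → List String → Int × Int
  | _, [] => (0, 0)
  | _, [e] =>
      let d : Int := if e = "+" then 1 else if e = "-" then -1 else 0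
      (d, max d 0)
  | 0, _ :: _ :: _ => (0, 0)  -- unreachable: fuel ≥ length
  | fuel + 1, a :: b :: rest =>
      let l := a :: b :: rest
      let k := l.length / 2
      let p := fDCF fuel (l.take k)
      let q := fDCF fuel (l.drop k)
      (p.1 + q.1, max p.2 (p.1 + q.2))

def fDC (l : List String) : Int × Int := fDCF l.length l

def f_alt (detector : List String) : Bool := decide ((fDC detector).2 ≥ 3)

-- ===== PRECONDITION & SPEC =====
def Spec_f (detector : List String) (out : Bool) : Prop := out = f_alt detector
instance (detector : List String) (out : Bool) : Decidable (Spec_f detector out) := by unfold Spec_f; infer_instance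

-- ===== CLAIM (what is proved, stated in full; the proofs are below) =====
def Claim_equal_f : Prop := ∀ (detector : List String), Dom_f detector → Spec_f detector (f detector)

-- ===== LEMMAS AND PROOFS =====

-- structural characterisations used to relate the two ports
def pvDelta (e : String) : Int := if e = "+" then 1 else if e = "-" then -1 else 0

def pvSum : List String → Int
  | [] => 0
  | e :: r => pvDelta e + pvSum r

def pvMaxPref : List String → Int
  | [] => 0
  | e :: r => max 0 (pvDelta e + pvMaxPref r)

lemma pvMaxPref_nonneg (l : List String) : 0 ≤ pvMaxPref l := by
  cases l <;> simp [pvMaxPref]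

lemma pvSum_append (a b : List String) : pvSum (a ++ b) = pvSum a + pvSum b := by
  induction a with
  | nil => simp [pvSum]
  | cons e r ih => simp [pvSum, ih]; ring

lemma pvMaxPref_append (a b : List String) :
    pvMaxPref (a ++ b) = max (pvMaxPref a) (pvSum a + pvMaxPref b) := by
  induction a with
  | nil =>
      have := pvMaxPref_nonneg b
      simp [pvMaxPref, pvSum]; omega
  | cons e r ih =>
      simp only [List.cons_append, pvMaxPref, pvSum, ih]
      omega

lemma fDCF_single (n : Nat) (e : String) :
    fDCF n [e] = (pvSum [e], pvMaxPref [e]) := by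
  cases n <;>
    · simp only [fDCF, pvSum, pvMaxPref, pvDelta]
      refine Prod.ext ?_ ?_
      · simp
      · simp [max_comm]

lemma fDCF_eq (n : Nat) : ∀ (l : List String), l.length ≤ n → fDCF n l = (pvSum l, pvMaxPref l) := by
  induction n with
  | zero =>
      intro l hl
      have : l = [] := List.eq_nil_of_length_eq_zero (Nat.le_zero.mp hl)
      subst this; rfl
  | succ n ih =>
      intro l hl
      match l with
      | [] => rfl
      | [e] => exact fDCF_single _ e
      | a :: b :: rest =>
        rw [fDCF]
        have h1 : ((a :: b :: rest).take ((a :: b :: rest).length / 2)).length ≤ n := by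
          simp only [List.length_take, List.length_cons] at *; omega
        have h2 : ((a :: b :: rest).drop ((a :: b :: rest).length / 2)).length ≤ n := by
          simp only [List.length_drop, List.length_cons] at *; omega
        rw [ih _ h1, ih _ h2]
        rw [← pvSum_append (((a :: b :: rest).take ((a :: b :: rest).length / 2)))
              (((a :: b :: rest).drop ((a :: b :: rest).length / 2))),
            ← pvMaxPref_append, List.take_append_drop]

lemma fDC_eq (l : List String) : fDC l = (pvSum l, pvMaxPref l) :=
  fDCF_eq l.length l le_rfl

lemma fLoopA_eq (l : List String) (cur maxO : Int) (h1 : cur ≤ maxO) (h2 : maxO < 3) :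
    fLoopA l cur maxO = decide (cur + pvMaxPref l ≥ 3) := by
  induction l generalizing cur maxO with
  | nil =>
      simp [fLoopA, pvMaxPref]; omega
  | cons e rest ih =>
      simp only [fLoopA, pvMaxPref]
      have hc : (if e = "+" then cur + 1 else if e = "-" then cur - 1 else cur)
          = cur + pvDelta e := by
        simp only [pvDelta]; split_ifs <;> omega
      rw [hc]
      have hmp := pvMaxPref_nonneg rest
      by_cases h3 : (if cur + pvDelta e > maxO then cur + pvDelta e else maxO) ≥ 3
      · have : cur + pvDelta e ≥ 3 := by split_ifs at h3 <;> omega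
        have : cur + max 0 (pvDelta e + pvMaxPref rest) ≥ 3 := by omega
        simp [h3, this]
      · have hlt : (if cur + pvDelta e > maxO then cur + pvDelta e else maxO) < 3 := by omega
        have hle : cur + pvDelta e ≤ (if cur + pvDelta e > maxO then cur + pvDelta e else maxO) := by
          split_ifs <;> omega
        rw [if_neg h3, ih _ _ hle hlt]
        have hcur : cur < 3 := by omega
        by_cases h4 : cur + pvDelta e + pvMaxPref rest ≥ 3
        · have : cur + max 0 (pvDelta e + pvMaxPref rest) ≥ 3 := by omega
          simp [h4, this]
        · have : ¬ (cur + max 0 (pvDelta e + pvMaxPref rest) ≥ 3) := by omega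
          simp [h4, this]

-- ===== VERDICT (by name: the statement is the Claim_ definition above) =====
theorem f_spec : Claim_equal_f := by
  intro d _
  unfold Spec_f f f_alt
  rw [fDC_eq d, fLoopA_eq d 0 0 le_rfl (by norm_num)]
  simp
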